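-- pv_equiv track=rewrite | github.com/jhaaaa/oldestlight | solar_lattice.py | inject_vowels
-- ===== SOURCE A (Python) =====
-- VOWELS_STR = "AEIOU"
--
-- CONSONANTS_STR = "BCDFGHJKLMNPQRSTVWXYZ"
--
-- def inject_vowels(letters: str) -> str:
--     """
--     Insert a vowel after every run of 2+ consonants.
--     The vowel is chosen deterministically from position mod 5.
--     Returns a continuous enriched letter stream (no spaces).
--     The added vowels are not in the original signal — they are
--     the codec's contribution, making the stream pronounceable.
--     """
--     result, run = [], 0
--     for i, c in enumerate(letters.upper()):
--         result.append(c)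
--         if c in CONSONANTS_STR:
--             run += 1
--             if run >= 2:
--                 result.append(VOWELS_STR[i % 5])
--                 run = 0
--         else:
--             run = 0
--     return "".join(result)
-- ===== SOURCE B (Python) =====
-- VOWELS_STR = "AEIOU"
-- CONSONANTS_SET = set("BCDFGHJKLMNPQRSTVWXYZ")
--
-- def inject_vowels(letters: str) -> str:
--     # Decompose the uppercased string into maximal consonant runs: inside a run,
--     # a vowel follows every char at odd local offset; its letter comes from the
--     # absolute index of that char.
--     s = letters.upper()
--     n = len(s)
--     out = []
--     i = 0
--     while i < n:
--         if s[i] not in CONSONANTS_SET: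
--             out.append(s[i])
--             i += 1
--         else:
--             j = i
--             while j < n and s[j] in CONSONANTS_SET:
--                 j += 1
--             # maximal consonant run s[i:j], starting at absolute index i
--             for k in range(j - i):
--                 out.append(s[i + k])
--                 if k % 2 == 1:
--                     out.append(VOWELS_STR[(i + k) % 5])
--             i = j
--     return "".join(out)
-- ===== Notes on version B (the rewrite author's own statement) =====
-- stated objective: alternative
-- what changed: B splits the uppercased string into maximal consonant runs and inserts vowels at the odd local offsets of each run by a parity formula, instead of A's single pass with a running consonant counter that is reset on every insertion and every non-consonant.
import Mathlib
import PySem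

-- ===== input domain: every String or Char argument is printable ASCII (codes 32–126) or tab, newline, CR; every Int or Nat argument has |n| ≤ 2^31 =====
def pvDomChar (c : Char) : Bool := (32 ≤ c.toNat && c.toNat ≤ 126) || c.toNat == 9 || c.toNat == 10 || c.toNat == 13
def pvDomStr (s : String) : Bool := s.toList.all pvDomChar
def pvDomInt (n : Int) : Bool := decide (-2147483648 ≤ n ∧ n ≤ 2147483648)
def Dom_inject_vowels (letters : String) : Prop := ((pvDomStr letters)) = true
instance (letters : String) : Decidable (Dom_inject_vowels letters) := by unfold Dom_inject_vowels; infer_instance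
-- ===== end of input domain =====

-- B replaces A's running consonant counter by a decomposition into maximal
-- consonant runs with vowels placed at odd local offsets (objective: alternative).

-- shared constants: VOWELS_STR[n % 5] (index always in range, so getD is exact)
def pvVowel (n : Nat) : Char := ['A', 'E', 'I', 'O', 'U'].getD (n % 5) 'A'
-- `c in CONSONANTS_STR` on a single char = char membership (exact)
def pvIsCons (c : Char) : Bool := "BCDFGHJKLMNPQRSTVWXYZ".toList.contains c

-- ===== PORT A =====
-- the for-loop over enumerate(letters.upper()) with state (result, run)
def injGo : List Char → Nat → Nat → List Char
  | [], _, _ => []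
  | c :: rest, i, run =>
    c :: (if pvIsCons c then
            (if run + 1 ≥ 2 then pvVowel i :: injGo rest (i + 1) 0
             else injGo rest (i + 1) (run + 1))
          else injGo rest (i + 1) 0)

def inject_vowels (letters : String) : String :=
  String.mk (injGo (PySem.Str.upper letters).toList 0 0)

-- ===== PORT B =====
-- inner for-loop of Source B: emit a consonant run starting at absolute index i,
-- local counter k, vowel after each odd local offset
def emitRun : List Char → Nat → Nat → List Char
  | [], _, _ => []
  | c :: r, i, k =>
    c :: (if k % 2 == 1 then pvVowel (i + k) :: emitRun r i (k + 1)
          else emitRun r i (k + 1))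

-- outer while-loop of Source B: peel one non-consonant, or one maximal consonant run
def altGo : List Char → Nat → List Char
  | [], _ => []
  | c :: rest, i =>
    if pvIsCons c then
      let run := c :: rest.takeWhile pvIsCons
      emitRun run i 0 ++ altGo (rest.dropWhile pvIsCons) (i + run.length)
    else c :: altGo rest (i + 1)
termination_by l _ => l.length
decreasing_by
  · simpa using Nat.lt_succ_of_le (List.length_dropWhile_le pvIsCons rest)
  · simp

def inject_vowels_alt (letters : String) : String :=
  String.mk (altGo (PySem.Str.upper letters).toList 0)

-- ===== PRECONDITION & SPEC =====
def Spec_inject_vowels (letters : String) (out : String) : Prop := out = inject_vowels_alt letters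
instance (letters : String) (out : String) : Decidable (Spec_inject_vowels letters out) := by unfold Spec_inject_vowels; infer_instance

-- ===== CLAIM (what is proved, stated in full; the proofs are below) =====
def Claim_equal_inject_vowels : Prop := ∀ (letters : String), Dom_inject_vowels letters → Spec_inject_vowels letters (inject_vowels letters)

-- ===== LEMMAS AND PROOFS =====

-- the head of dropWhile p fails p
lemma head?_dropWhile_false {α : Type} (p : α → Bool) :
    ∀ (l : List α) (d : α), (l.dropWhile p).head? = some d → p d = false := by
  intro l
  induction l with
  | nil => simp
  | cons c t ih =>
    intro d hd
    by_cases hc : p c = true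
    · exact ih d (by simpa [List.dropWhile_cons, hc] using hd)
    · have hc' : p c = false := by simpa using hc
      simp [hc'] at hd
      exact hd ▸ hc'

-- A's run state is irrelevant when the next char is not a consonant (or the list ends)
lemma injGo_run_irrel (l : List Char) (i r : Nat)
    (h : ∀ d, l.head? = some d → pvIsCons d = false) :
    injGo l i r = injGo l i 0 := by
  cases l with
  | nil => rfl
  | cons c t => simp [injGo, h c rfl]

-- inside a consonant run, A's counter at local offset k is k % 2 and produces
-- exactly B's emitRun
lemma bridge : ∀ (r : List Char), (∀ c ∈ r, pvIsCons c = true) →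
    ∀ (rest : List Char), (∀ d, rest.head? = some d → pvIsCons d = false) →
    ∀ i k, injGo (r ++ rest) (i + k) (k % 2) =
      emitRun r i k ++ injGo rest (i + k + r.length) 0 := by
  intro r
  induction r with
  | nil =>
    intro _ rest hrest i k
    simpa using injGo_run_irrel rest (i + k) (k % 2) hrest
  | cons c r' ih =>
    intro hr rest hrest i k
    have hc : pvIsCons c = true := hr c (List.mem_cons_self ..)
    have hr' : ∀ x ∈ r', pvIsCons x = true := fun x hx => hr x (List.mem_cons_of_mem _ hx)
    have key := ih hr' rest hrest i (k + 1)
    rcases Nat.mod_two_eq_zero_or_one k with hk | hk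
    · have h1 : (k + 1) % 2 = 1 := by omega
      have harg : i + k + (c :: r').length = i + (k + 1) + r'.length := by
        simp; omega
      simp only [List.cons_append, injGo, emitRun, hc, hk, h1, harg] at key ⊢
      simpa using key
    · have h1 : (k + 1) % 2 = 0 := by omega
      have harg : i + k + (c :: r').length = i + (k + 1) + r'.length := by
        simp; omega
      simp only [List.cons_append, injGo, emitRun, hc, hk, h1, harg] at key ⊢
      simpa using key

lemma main_eq : ∀ (n : Nat) (l : List Char), l.length ≤ n → ∀ i, injGo l i 0 = altGo l i := by
  intro n
  induction n with
  | zero =>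
    intro l hl i
    have : l = [] := List.eq_nil_of_length_eq_zero (Nat.le_zero.mp hl)
    simp [this, injGo, altGo]
  | succ n ih =>
    intro l hl i
    cases l with
    | nil => simp [injGo, altGo]
    | cons c rest =>
      have hrest : rest.length ≤ n := by simpa using hl
      by_cases hc : pvIsCons c = true
      · have htw : ∀ x ∈ rest.takeWhile pvIsCons, pvIsCons x = true :=
          fun x hx => List.mem_takeWhile_imp hx
        have hdw : ∀ d, (rest.dropWhile pvIsCons).head? = some d → pvIsCons d = false :=
          fun d hd => head?_dropWhile_false pvIsCons rest d hd
        have hsplit : rest = rest.takeWhile pvIsCons ++ rest.dropWhile pvIsCons :=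
          (List.takeWhile_append_dropWhile ..).symm
        have hb := bridge (rest.takeWhile pvIsCons) htw (rest.dropWhile pvIsCons) hdw i 1
        have hdwlen : (rest.dropWhile pvIsCons).length ≤ n :=
          le_trans (List.length_dropWhile_le _ _) hrest
        have hrec := ih (rest.dropWhile pvIsCons) hdwlen
          (i + 1 + (rest.takeWhile pvIsCons).length)
        simp only [injGo, altGo, hc, if_pos, emitRun] at *
        rw [show injGo rest (i + 1) 1 =
              injGo (rest.takeWhile pvIsCons ++ rest.dropWhile pvIsCons) (i + 1) (1 % 2) by
            rw [← hsplit]]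
        rw [hb, hrec]
        simp [Nat.add_assoc, Nat.add_comm 1 _]
      · have hc' : pvIsCons c = false := by simpa using hc
        simp [injGo, altGo, hc', ih rest hrest (i + 1)]

-- ===== VERDICT (by name: the statement is the Claim_ definition above) =====
theorem inject_vowels_spec : Claim_equal_inject_vowels := by
  intro letters _
  unfold Spec_inject_vowels inject_vowels inject_vowels_alt
  rw [main_eq (PySem.Str.upper letters).toList.length _ le_rfl]
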